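-- pv_equiv track=rewrite | github.com/tushar1977/aoc-2025 | aoc_tools.py | dp_memo
-- ===== SOURCE A (Python) =====
-- def dp_memo(display, towels, memo):
--     if display in memo:
--         return memo[display]
--
--     if display == "":
--         return 1
--
--     ways = 0
--     for p in towels:
--         if display.startswith(p):
--             remaining = display[len(p) :]
--             ways += dp_memo(remaining, towels, memo)
--
--     memo[display] = ways
--     return ways
-- ===== SOURCE B (Python) =====
-- def dp_memo(display, towels, memo):
--     n = len(display)
--     keylens = set(len(k) for k in memo)
--     ways = [0] * (n + 1)
--     for i in reversed(range(n + 1)):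
--         v = memo.get(display[i:]) if (n - i) in keylens else None
--         if v is not None:
--             ways[i] = v
--         elif i == n:
--             ways[i] = 1
--         else:
--             total = 0
--             for p in towels:
--                 if display.startswith(p, i):
--                     total += ways[i + len(p)]
--             ways[i] = total
--     return ways[0]
-- ===== Notes on version B (the rewrite author's own statement) =====
-- stated objective: alternative
-- what changed: Replaced the memoized top-down recursion over suffix strings (which mutates the memo dict) by a single bottom-up DP pass filling an array of counts indexed by suffix start position, consulting the given memo via a precomputed set of its key lengths; no recursion and no memo mutation.
import Mathlib
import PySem

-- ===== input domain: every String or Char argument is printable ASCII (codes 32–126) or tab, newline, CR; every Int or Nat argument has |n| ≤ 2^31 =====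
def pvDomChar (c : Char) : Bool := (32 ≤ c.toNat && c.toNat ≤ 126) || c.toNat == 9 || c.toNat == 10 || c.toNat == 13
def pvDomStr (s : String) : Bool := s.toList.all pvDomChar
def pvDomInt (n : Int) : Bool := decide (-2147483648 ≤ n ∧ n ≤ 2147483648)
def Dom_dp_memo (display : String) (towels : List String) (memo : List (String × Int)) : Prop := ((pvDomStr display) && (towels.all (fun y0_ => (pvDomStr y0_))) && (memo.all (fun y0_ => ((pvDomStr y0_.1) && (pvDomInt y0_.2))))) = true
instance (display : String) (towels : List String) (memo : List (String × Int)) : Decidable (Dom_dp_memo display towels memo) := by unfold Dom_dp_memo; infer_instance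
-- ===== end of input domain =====

-- B replaces A's memoized recursion over suffix strings by a single bottom-up array DP over
-- suffix start indices; equivalence is about the RETURN value only (A also mutates `memo`,
-- B does not).

-- ===== PORT A =====
-- A's recursion threads the mutated dict through the calls: state = (ways so far, memo).
-- The `PySem.Str.len p = 0` test is a TOTALITY GUARD only: there Python recurses on the
-- unchanged `display` forever (RecursionError), which Pre_ excludes.
mutual
def dpAGo (display : String) (towels : List String) (memo : PySem.Dict String Int) :
    Int × PySem.Dict String Int :=
  match PySem.Dict.get? memo display with
  | some v => (v, memo)                                  -- if display in memo: return memo[display]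
  | none =>
    if display = "" then (1, memo)                       -- if display == "": return 1
    else
      let r := dpALoop display towels towels 0 memo      -- ways = 0; for p in towels: …
      (r.1, PySem.Dict.insert r.2 display r.1)           -- memo[display] = ways; return ways
  termination_by (display.toList.length, towels.length + 1)
def dpALoop (display : String) (allTowels : List String) (ts : List String) (ways : Int)
    (memo : PySem.Dict String Int) : Int × PySem.Dict String Int :=
  match ts with
  | [] => (ways, memo)
  | p :: rest =>
    if PySem.Str.startswith display p then
      if PySem.Str.len p = 0 then
        dpALoop display allTowels rest ways memo         -- totality guard (see above)
      else
        let remaining := PySem.Str.slice display (some (PySem.Str.len p)) none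
        let r := dpAGo remaining allTowels memo          -- ways += dp_memo(remaining, towels, memo)
        dpALoop display allTowels rest (ways + r.1) r.2
    else dpALoop display allTowels rest ways memo
  termination_by (display.toList.length, ts.length)
  decreasing_by
    · apply Prod.Lex.right; simp [List.length_cons]
    · apply Prod.Lex.left
      have h1 := (PySem.Chars.startswith_iff display.toList p.toList).1
        (by rw [← PySem.Str.startswith_eq]; assumption)
      have h2 := h1.length_le
      have h3 : PySem.Str.len p = (p.toList.length : Int) := PySem.Str.len_eq p
      simp only [PySem.Str.toList_slice, PySem.Chars.slice_eq_listSlice]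
      rw [show (PySem.Str.len p) = ((p.toList.length : Nat) : Int) from h3,
        PySem.List.slice_from_natCast]
      simp only [List.length_drop]
      omega
    · apply Prod.Lex.right; simp [List.length_cons]
    · apply Prod.Lex.right; simp [List.length_cons]
end

def dp_memo (display : String) (towels : List String) (memo : List (String × Int)) : Int :=
  (dpAGo display towels (PySem.Dict.mk memo)).1

-- ===== PORT B =====
-- one iteration of Source B's `for i in reversed(range(n + 1))` body (i is a suffix start index)
-- (Source B's locals `n` and `v` are inlined here; `display.startswith(p, i)` is exact:
-- Python compares p against display starting at offset i, i.e. a prefix test on drop i)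
def dpBStep (display : String) (towels : List String) (memo : PySem.Dict String Int)
    (keylens : List Int) (ways : List Int) (i : Nat) : List Int :=
  match (if keylens.contains ((display.toList.length - i : Nat) : Int) then   -- (n - i) in keylens (i ≤ n, so Nat subtraction is exact)
      PySem.Dict.get? memo (PySem.Str.slice display (some (i : Int)) none)    -- memo.get(display[i:])
    else none) with
  | some w => ways.set i w                                                    -- if v is not None: ways[i] = v
  | none =>
    if i = display.toList.length then ways.set i 1                            -- elif i == n: ways[i] = 1
    else
      ways.set i (towels.foldl (fun total p =>                                -- for p in towels: …
        if PySem.Chars.startswith (display.toList.drop i) p.toList then       -- display.startswith(p, i)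
          total + ways.getD (i + p.toList.length) 0                          -- ways[i + len(p)] (index always in range)
        else total) 0)

def dp_memo_alt (display : String) (towels : List String) (memo : List (String × Int)) : Int :=
  let n := display.toList.length                                        -- n = len(display)
  let keylens : PySem.Set Int :=
    PySem.Set.ofList (memo.map (fun kv => PySem.Str.len kv.1))          -- set(len(k) for k in memo)
  let ways := ((List.range (n + 1)).reverse).foldl                      -- for i in reversed(range(n+1)) (indices 0..n)
    (dpBStep display towels (PySem.Dict.mk memo) keylens) (List.replicate (n + 1) 0)
  ways.getD 0 0                                                         -- return ways[0]

-- ===== PRECONDITION & SPEC =====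
-- Pre_ excludes exactly the inputs on which Python A does not return: with "" ∈ towels and a
-- non-empty display not already a memo key, A recurses on the unchanged display forever
-- (RecursionError).
def Pre_dp_memo (display : String) (towels : List String) (memo : List (String × Int)) : Prop :=
  "" ∈ towels → (display = "" ∨ display ∈ memo.map Prod.fst)
instance (display : String) (towels : List String) (memo : List (String × Int)) : Decidable (Pre_dp_memo display towels memo) := by unfold Pre_dp_memo; infer_instance

def pvWitness_dp_memo : String × List String × (List (String × Int)) :=
  ("rgb", ["r", "g", "b", "gb"], [("xy", 5)])

def Spec_dp_memo (display : String) (towels : List String) (memo : List (String × Int)) (out : Int) : Prop := out = dp_memo_alt display towels memo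
instance (display : String) (towels : List String) (memo : List (String × Int)) (out : Int) : Decidable (Spec_dp_memo display towels memo out) := by unfold Spec_dp_memo; infer_instance

-- ===== CLAIM (what is proved, stated in full; the proofs are below) =====
def Claim_equal_dp_memo : Prop := ∀ (display : String) (towels : List String) (memo : List (String × Int)), Dom_dp_memo display towels memo → Pre_dp_memo display towels memo → Spec_dp_memo display towels memo (dp_memo display towels memo)

-- ===== LEMMAS AND PROOFS =====

-- Pure reference function: the value A's recursion computes, without the memo threading
-- (memo lookups against the FIXED initial dict M); keyed on the suffix as a List Char.
mutual
def pvF (M : PySem.Dict String Int) (towels : List String) (s : List Char) : Int :=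
  match PySem.Dict.get? M (String.ofList s) with
  | some v => v
  | none => if s.isEmpty then 1 else pvFLoop M towels towels s
  termination_by (s.length, towels.length + 1)
def pvFLoop (M : PySem.Dict String Int) (allTowels : List String) (ts : List String)
    (s : List Char) : Int :=
  match ts with
  | [] => 0
  | p :: rest =>
    (if PySem.Chars.startswith s p.toList then
       if p.toList.length = 0 then 0 else pvF M allTowels (s.drop p.toList.length)
     else 0) + pvFLoop M allTowels rest s
  termination_by (s.length, ts.length)
  decreasing_by
    · apply Prod.Lex.left
      have h2 := ((PySem.Chars.startswith_iff s p.toList).1 (by assumption)).length_le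
      simp only [List.length_drop]; omega
    · apply Prod.Lex.right; simp [List.length_cons]
end

-- memo-threading invariant: `m` extends the initial dict `M` and every entry of `m`
-- carries the pure value `pvF M towels` of its key
def pvInv (M m : PySem.Dict String Int) (towels : List String) : Prop :=
  (∀ s v, PySem.Dict.get? M s = some v → PySem.Dict.get? m s = some v) ∧
  (∀ s v, PySem.Dict.get? m s = some v → v = pvF M towels s.toList)

theorem pvF_lookup (M : PySem.Dict String Int) (towels : List String) (s : String) (v : Int)
    (h : PySem.Dict.get? M s = some v) : pvF M towels s.toList = v := by
  rw [pvF, String.ofList_toList, h]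

theorem toList_sliceFromNat (s : String) (i : Nat) :
    (PySem.Str.slice s (some (i : Int)) none).toList = s.toList.drop i := by
  rw [PySem.Str.toList_slice, PySem.Chars.slice_eq_listSlice, PySem.List.slice_from_natCast]

theorem keylen_mem (memo : List (String × Int)) (s : String) (v : Int)
    (h : PySem.Dict.get? (PySem.Dict.mk memo) s = some v) :
    PySem.Str.len s ∈ memo.map (fun kv => PySem.Str.len kv.1) := by
  unfold PySem.Dict.get? at h
  cases hf : List.find? (fun p => p.1 == s) (PySem.Dict.mk memo).items with
  | none => rw [hf] at h; simp at h
  | some kv =>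
    have hmem : kv ∈ memo := List.mem_of_find?_eq_some hf
    have hp : kv.1 = s := by simpa using List.find?_some hf
    exact List.mem_map.2 ⟨kv, hmem, by rw [hp]⟩

-- ===== A-side: the memoized recursion computes pvF =====

theorem dpALoop_eq (M : PySem.Dict String Int) (towels : List String) (s : String)
    (IH : ∀ (s' : String) (m' : PySem.Dict String Int), s'.toList.length < s.toList.length →
      pvInv M m' towels →
      (dpAGo s' towels m').1 = pvF M towels s'.toList ∧ pvInv M (dpAGo s' towels m').2 towels) :
    ∀ (ts : List String) (ways : Int) (m : PySem.Dict String Int), pvInv M m towels →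
      (dpALoop s towels ts ways m).1 = ways + pvFLoop M towels ts s.toList ∧
      pvInv M (dpALoop s towels ts ways m).2 towels := by
  intro ts
  induction ts with
  | nil => intro ways m hinv; rw [dpALoop, pvFLoop]; exact ⟨by ring, hinv⟩
  | cons p rest ih =>
    intro ways m hinv
    rw [dpALoop, pvFLoop]
    by_cases hsw : PySem.Str.startswith s p = true
    · simp only [hsw, if_true]
      have hswl : PySem.Chars.startswith s.toList p.toList = true := by
        rw [← PySem.Str.startswith_eq]; exact hsw
      have hpre := ((PySem.Chars.startswith_iff _ _).1 hswl).length_le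
      by_cases hlen : PySem.Str.len p = 0
      · have hl0 : p.toList.length = 0 := by
          have := PySem.Str.len_eq p; omega
        simp only [hlen, if_true, hswl, hl0]
        obtain ⟨h1, h2⟩ := ih ways m hinv
        exact ⟨by rw [h1]; ring, h2⟩
      · have hl0 : ¬ p.toList.length = 0 := by
          have := PySem.Str.len_eq p; intro h; apply hlen; rw [this, h]; rfl
        simp only [hlen, if_false, hswl, hl0, if_true]
        have hrem : (PySem.Str.slice s (some (PySem.Str.len p)) none).toList
            = s.toList.drop p.toList.length := by
          rw [PySem.Str.len_eq]; exact toList_sliceFromNat s p.toList.length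
        have hremlt : (PySem.Str.slice s (some (PySem.Str.len p)) none).toList.length
            < s.toList.length := by
          rw [hrem, List.length_drop]; omega
        obtain ⟨g1, g2⟩ := IH _ m hremlt hinv
        obtain ⟨h1, h2⟩ := ih (ways + (dpAGo (PySem.Str.slice s (some (PySem.Str.len p)) none) towels m).1)
          (dpAGo (PySem.Str.slice s (some (PySem.Str.len p)) none) towels m).2 g2
        refine ⟨?_, h2⟩
        rw [h1, g1, hrem]; ring
    · have hswl : PySem.Chars.startswith s.toList p.toList = false := by
        rw [← PySem.Str.startswith_eq]; simpa using hsw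
      have hsw' : PySem.Str.startswith s p = false := by simpa using hsw
      simp only [hsw', hswl, Bool.false_eq_true, if_false]
      obtain ⟨h1, h2⟩ := ih ways m hinv
      exact ⟨by rw [h1]; ring, h2⟩

theorem dpAGo_eq (M : PySem.Dict String Int) (towels : List String) :
    ∀ (N : Nat) (s : String) (m : PySem.Dict String Int), s.toList.length < N →
      pvInv M m towels →
      (dpAGo s towels m).1 = pvF M towels s.toList ∧ pvInv M (dpAGo s towels m).2 towels := by
  intro N
  induction N with
  | zero => intro s m h; omega
  | succ N ihN =>
    intro s m hlen hinv
    rw [dpAGo]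
    cases hm : PySem.Dict.get? m s with
    | some v =>
      refine ⟨?_, hinv⟩
      show v = pvF M towels s.toList
      exact hinv.2 s v hm
    | none =>
      have hM : PySem.Dict.get? M s = none := by
        cases hM : PySem.Dict.get? M s with
        | none => rfl
        | some v => rw [hinv.1 s v hM] at hm; exact absurd hm (by simp)
      by_cases hempty : s = ""
      · subst hempty
        simp only [if_true]
        constructor
        · rw [pvF, String.ofList_toList, hM]; rfl
        · exact hinv
      · simp only [hempty, if_false]
        have hIH : ∀ (s' : String) (m' : PySem.Dict String Int),
            s'.toList.length < s.toList.length → pvInv M m' towels →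
            (dpAGo s' towels m').1 = pvF M towels s'.toList ∧
            pvInv M (dpAGo s' towels m').2 towels := by
          intro s' m' hlt hin
          exact ihN s' m' (by omega) hin
        obtain ⟨h1, h2⟩ := dpALoop_eq M towels s hIH towels 0 m hinv
        have hne : ¬ s.toList.isEmpty = true := by
          simp only [List.isEmpty_iff]
          intro hc
          apply hempty
          rw [← String.ofList_toList (s := s), hc]
        have hpv : pvF M towels s.toList = pvFLoop M towels towels s.toList := by
          rw [pvF, String.ofList_toList, hM]
          simp only [hne, if_false, Bool.false_eq_true]
        constructor
        · simp only [h1, hpv]; ring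
        · -- inserted entry carries the pure value
          refine ⟨?_, ?_⟩
          · intro s' v hv
            have hne' : s' ≠ s := by
              intro hc; subst hc
              rw [hinv.1 s' v hv] at hm; exact absurd hm (by simp)
            rw [PySem.Dict.get?_insert_of_ne _ _ hne']
            exact h2.1 s' v hv
          · intro s' v hv
            by_cases hc : s' = s
            · rw [hc, PySem.Dict.get?_insert_self] at hv
              injection hv with h
              rw [hc, ← h, h1, hpv]; ring
            · rw [PySem.Dict.get?_insert_of_ne _ _ hc] at hv
              exact h2.2 s' v hv

theorem dp_memo_eq_pvF (display : String) (towels : List String) (memo : List (String × Int)) :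
    dp_memo display towels memo = pvF (PySem.Dict.mk memo) towels display.toList := by
  have h := dpAGo_eq (PySem.Dict.mk memo) towels (display.toList.length + 1) display
    (PySem.Dict.mk memo) (by omega)
    ⟨fun s v hv => hv, fun s v hv => (pvF_lookup _ towels s v hv).symm⟩
  exact h.1

-- ===== B-side: the bottom-up array DP computes pvF =====

theorem dpBInner_eq (display : String) (towels : List String) (memo : List (String × Int))
    (m : Nat) (ws : List Int) (hmn : m < display.toList.length)
    (hhi : ∀ j, m + 1 ≤ j → j ≤ display.toList.length →
      ws.getD j 0 = pvF (PySem.Dict.mk memo) towels (display.toList.drop j))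
    (hlo : ∀ j, j < m + 1 → ws.getD j 0 = 0) :
    ∀ (ts : List String) (acc : Int),
      ts.foldl (fun total p =>
        if PySem.Chars.startswith (display.toList.drop m) p.toList then
          total + ws.getD (m + p.toList.length) 0
        else total) acc
      = acc + pvFLoop (PySem.Dict.mk memo) towels ts (display.toList.drop m) := by
  intro ts
  induction ts with
  | nil => intro acc; rw [pvFLoop]; simp
  | cons p rest ih =>
    intro acc
    rw [List.foldl_cons, pvFLoop]
    cases hswl : PySem.Chars.startswith (display.toList.drop m) p.toList with
    | false =>
      simp only [Bool.false_eq_true, if_false]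
      rw [ih acc]; ring
    | true =>
      simp only [if_true]
      have hple : p.toList.length ≤ display.toList.length - m := by
        have := ((PySem.Chars.startswith_iff _ _).1 hswl).length_le
        simpa [List.length_drop] using this
      have hcontrib : ws.getD (m + p.toList.length) 0
          = (if p.toList.length = 0 then 0
             else pvF (PySem.Dict.mk memo) towels (List.drop p.toList.length (display.toList.drop m))) := by
        by_cases h0 : p.toList.length = 0
        · simp only [h0, if_true]
          simpa using hlo m (by omega)
        · simp only [h0, if_false]
          rw [List.drop_drop]
          have := hhi (m + p.toList.length) (by omega) (by omega)
          rw [this]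
      rw [hcontrib, ih]
      ring

theorem pvGetD_set_self (l : List Int) (i : Nat) (a : Int) (h : i < l.length) :
    (l.set i a).getD i 0 = a := by
  simp [List.getD, h]

theorem pvGetD_set_ne (l : List Int) (i j : Nat) (a : Int) (h : j ≠ i) :
    (l.set i a).getD j 0 = l.getD j 0 := by
  rw [List.getD, List.getD, List.getElem?_set_ne (by omega)]

theorem dpBStep_length (display : String) (towels : List String) (memo : PySem.Dict String Int)
    (keylens : List Int) (ws : List Int) (i : Nat) :
    (dpBStep display towels memo keylens ws i).length = ws.length := by
  unfold dpBStep
  split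
  · simp [List.length_set]
  · split <;> simp [List.length_set]

theorem dpBStep_getD_ne (display : String) (towels : List String) (memo : PySem.Dict String Int)
    (keylens : List Int) (ws : List Int) (i j : Nat) (h : j ≠ i) :
    (dpBStep display towels memo keylens ws i).getD j 0 = ws.getD j 0 := by
  unfold dpBStep
  split
  · exact pvGetD_set_ne _ _ _ _ h
  · split
    · exact pvGetD_set_ne _ _ _ _ h
    · exact pvGetD_set_ne _ _ _ _ h

theorem dpBStep_getD_self (display : String) (towels : List String) (memo : List (String × Int))
    (m : Nat) (ws : List Int) (hm : m ≤ display.toList.length)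
    (hlen : ws.length = display.toList.length + 1)
    (hhi : ∀ j, m + 1 ≤ j → j ≤ display.toList.length →
      ws.getD j 0 = pvF (PySem.Dict.mk memo) towels (display.toList.drop j))
    (hlo : ∀ j, j < m + 1 → ws.getD j 0 = 0) :
    (dpBStep display towels (PySem.Dict.mk memo)
        (PySem.Set.ofList (memo.map (fun kv => PySem.Str.len kv.1))) ws m).getD m 0
      = pvF (PySem.Dict.mk memo) towels (display.toList.drop m) := by
  have hmlt : m < ws.length := by omega
  have hsuf : (PySem.Str.slice display (some (m : Int)) none).toList
      = display.toList.drop m := toList_sliceFromNat display m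
  have hkey : PySem.Str.slice display (some (m : Int)) none
      = String.ofList (display.toList.drop m) := by
    rw [← String.ofList_toList (s := PySem.Str.slice display (some (m : Int)) none), hsuf]
  unfold dpBStep
  split
  · -- v = some w: the memo carries this suffix
    rename_i w hsome
    have hget : PySem.Dict.get? (PySem.Dict.mk memo) (String.ofList (display.toList.drop m))
        = some w := by
      rw [← hkey]
      split at hsome
      · exact hsome
      · exact absurd hsome (by simp)
    rw [pvF, hget, pvGetD_set_self _ _ _ hmlt]
  · -- v = none: the memo has no entry for this suffix
    rename_i hnone
    have hget : PySem.Dict.get? (PySem.Dict.mk memo) (String.ofList (display.toList.drop m))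
        = none := by
      split at hnone
      · rw [← hkey]; exact hnone
      · rename_i hcont
        cases hg : PySem.Dict.get? (PySem.Dict.mk memo) (String.ofList (display.toList.drop m)) with
        | none => rfl
        | some w =>
          exfalso
          apply hcont
          have hlen' : ((display.toList.length - m : Nat) : Int)
              = PySem.Str.len (String.ofList (display.toList.drop m)) := by
            rw [PySem.Str.len_eq, String.toList_ofList, List.length_drop]
          rw [hlen']
          exact List.elem_eq_true_of_mem ((PySem.Set.mem_ofList _ _).2 (keylen_mem memo _ w hg))
    by_cases hmn : m = display.toList.length
    · simp only [hmn, if_true]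
      rw [pvF]
      rw [hmn] at hget
      rw [hget]
      simp only [List.drop_length, List.isEmpty_nil, if_true]
      exact pvGetD_set_self _ _ _ (by omega)
    · simp only [hmn, if_false]
      have hfold := dpBInner_eq display towels memo m ws (by omega) hhi hlo towels 0
      rw [pvF, hget]
      have hne : (display.toList.drop m).isEmpty = false := by
        simp only [List.isEmpty_eq_false_iff, ne_eq, ← List.length_pos_iff, List.length_drop]
        omega
      rw [hne]
      simp only [Bool.false_eq_true, if_false]
      rw [pvGetD_set_self _ _ _ hmlt, hfold]
      ring

theorem dpBFold_eq (display : String) (towels : List String) (memo : List (String × Int)) :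
    ∀ (m : Nat) (ws : List Int), m ≤ display.toList.length + 1 →
      ws.length = display.toList.length + 1 →
      (∀ j, m ≤ j → j ≤ display.toList.length →
        ws.getD j 0 = pvF (PySem.Dict.mk memo) towels (display.toList.drop j)) →
      (∀ j, j < m → ws.getD j 0 = 0) →
      ∀ j, j ≤ display.toList.length →
        (((List.range m).reverse).foldl
          (dpBStep display towels (PySem.Dict.mk memo)
            (PySem.Set.ofList (memo.map (fun kv => PySem.Str.len kv.1)))) ws).getD j 0
        = pvF (PySem.Dict.mk memo) towels (display.toList.drop j) := by
  intro m
  induction m with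
  | zero =>
    intro ws _ _ hhi _ j hj
    simpa using hhi j (by omega) hj
  | succ m ih =>
    intro ws hm hlen hhi hlo j hj
    have hrange : (List.range (m + 1)).reverse = m :: (List.range m).reverse := by
      simp [List.range_succ]
    rw [hrange, List.foldl_cons]
    apply ih
    · omega
    · rw [dpBStep_length]; exact hlen
    · intro j' hj1 hj2
      by_cases hc : j' = m
      · rw [hc]
        exact dpBStep_getD_self display towels memo m ws (by omega) hlen hhi hlo
      · rw [dpBStep_getD_ne _ _ _ _ _ _ _ hc]
        exact hhi j' (by omega) hj2
    · intro j' hj'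
      rw [dpBStep_getD_ne _ _ _ _ _ _ _ (by omega)]
      exact hlo j' (by omega)
    · exact hj

theorem dp_memo_alt_eq_pvF (display : String) (towels : List String) (memo : List (String × Int)) :
    dp_memo_alt display towels memo = pvF (PySem.Dict.mk memo) towels display.toList := by
  unfold dp_memo_alt
  have h := dpBFold_eq display towels memo (display.toList.length + 1)
    (List.replicate (display.toList.length + 1) 0) (by omega) (by simp)
    (by intro j h1 h2; omega)
    (by intro j hj; simp [List.getD])
    0 (by omega)
  simpa using h

-- ===== VERDICT (by name: the statement is the Claim_ definition above) =====
theorem dp_memo_spec : Claim_equal_dp_memo := by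
  intro display towels memo _ _
  unfold Spec_dp_memo
  rw [dp_memo_eq_pvF, dp_memo_alt_eq_pvF]
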